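-- pv_equiv track=rewrite | github.com/pjv-stack/synapse-system-pro | .synapse/agents/ux-designer/tools/design_tools.py | _calculate_color_harmony
-- ===== SOURCE A (Python) =====
-- from typing import Dict, List, Any, Optional, Tuple
--
-- def _calculate_color_harmony(colors: List[Dict[str, Any]]) -> int:
--     """Calculate color harmony score based on HSV relationships."""
--     if len(colors) < 2:
--         return 50
--
--     try:
--         hues = [color["hsv"][0] for color in colors if color.get("hsv")]
--         if not hues:
--             return 50
--
--         # Check for common color harmonies
--         harmony_score = 50
--
--         # Complementary (180° apart)
--         for i, h1 in enumerate(hues):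
--             for h2 in hues[i+1:]:
--                 diff = abs(h1 - h2)
--                 if abs(diff - 180) < 15:  # Allow 15° tolerance
--                     harmony_score += 15
--
--         # Triadic (120° apart)
--         if len(hues) >= 3:
--             for i, h1 in enumerate(hues):
--                 for j, h2 in enumerate(hues[i+1:], i+1):
--                     for h3 in hues[j+1:]:
--                         if abs(abs(h1-h2) - 120) < 15 and abs(abs(h2-h3) - 120) < 15:
--                             harmony_score += 20
--
--         # Analogous (close together)
--         close_colors = 0
--         for i, h1 in enumerate(hues):
--             for h2 in hues[i+1:]:
--                 if abs(h1 - h2) < 30: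
--                     close_colors += 1
--
--         if close_colors >= 2:
--             harmony_score += 10
--
--         return min(100, harmony_score)
--     except:
--         return 50
-- ===== SOURCE B (Python) =====
-- from typing import Dict, List, Any
--
-- def _calculate_color_harmony(colors: List[Dict[str, Any]]) -> int:
--     """Calculate color harmony score based on HSV relationships.
--
--     Counts triadic triples per middle hue as left-count * right-count
--     instead of enumerating the triples."""
--     if len(colors) < 2:
--         return 50
--     hues = []
--     for color in colors:
--         hsv = color.get("hsv")
--         if hsv:
--             hues.append(hsv[0])
--     if not hues:
--         return 50
--
--     comp = 0   # complementary pairs (≈180° apart)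
--     tri = 0    # triadic triples, via left/right 120°-neighbour counts per middle hue
--     close = 0  # analogous pairs (<30° apart)
--     for j, hj in enumerate(hues):
--         before, after = hues[:j], hues[j + 1:]
--         left = sum(1 for x in before if abs(abs(x - hj) - 120) < 15)
--         right = sum(1 for x in after if abs(abs(hj - x) - 120) < 15)
--         comp += sum(1 for x in after if abs(abs(hj - x) - 180) < 15)
--         close += sum(1 for x in after if abs(hj - x) < 30)
--         tri += left * right
--
--     score = 50 + 15 * comp + 20 * tri + (10 if close >= 2 else 0)
--     return min(100, score)
-- ===== Notes on version B (the rewrite author's own statement) =====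
-- stated objective: alternative
-- what changed: Triadic triples are counted per middle hue as (left 120-degree-neighbour count) x (right 120-degree-neighbour count) in a single sweep that also tallies complementary and analogous pairs, replacing A's triple nested loop over all triples.
import Mathlib
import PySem

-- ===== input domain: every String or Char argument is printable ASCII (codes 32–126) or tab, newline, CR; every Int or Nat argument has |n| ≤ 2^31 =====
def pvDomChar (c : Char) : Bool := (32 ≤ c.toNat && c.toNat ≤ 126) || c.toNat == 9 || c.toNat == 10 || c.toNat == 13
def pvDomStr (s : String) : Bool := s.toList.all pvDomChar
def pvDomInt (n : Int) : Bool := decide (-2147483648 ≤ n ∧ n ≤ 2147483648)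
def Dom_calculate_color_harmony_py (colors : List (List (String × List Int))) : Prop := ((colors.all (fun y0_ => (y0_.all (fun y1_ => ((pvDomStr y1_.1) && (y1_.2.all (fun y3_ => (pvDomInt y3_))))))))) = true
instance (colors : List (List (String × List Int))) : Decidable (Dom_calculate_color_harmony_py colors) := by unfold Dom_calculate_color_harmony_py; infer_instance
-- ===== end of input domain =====

-- B replaces A's triadic triple enumeration by a per-middle left-count × right-count
-- sweep that also tallies the two kinds of pairs (alternative algorithm, same result).

-- ===== PORT A =====
-- color.get("hsv"): first match in the association list
def pvGetHsv : List (String × List Int) → Option (List Int)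
  | [] => none
  | (k, v) :: t => if k = "hsv" then some v else pvGetHsv t

-- hues = [color["hsv"][0] for color in colors if color.get("hsv")]
-- (a list is truthy iff nonempty, so the [0] access is then safe)
def pvHues (colors : List (List (String × List Int))) : List Int :=
  colors.foldl (fun acc c =>
    match pvGetHsv c with
    | some (h :: _) => acc ++ [h]
    | _ => acc) []

def pvNearC (a b : Int) : Bool := decide (|(|a - b|) - 180| < 15)
def pvNearT (a b : Int) : Bool := decide (|(|a - b|) - 120| < 15)
def pvNearA (a b : Int) : Bool := decide (|a - b| < 30)

-- complementary double loop: for i,h1 …: for h2 in hues[i+1:]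
def pvCompLoop : List Int → Int → Int
  | [], s => s
  | h1 :: t, s => pvCompLoop t (t.foldl (fun a h2 => if pvNearC h1 h2 then a + 15 else a) s)

-- triadic inner two loops for a fixed h1
def pvTriMid (h1 : Int) : List Int → Int → Int
  | [], s => s
  | h2 :: t, s => pvTriMid h1 t (t.foldl (fun a h3 => if pvNearT h1 h2 && pvNearT h2 h3 then a + 20 else a) s)

def pvTriLoop : List Int → Int → Int
  | [], s => s
  | h1 :: t, s => pvTriLoop t (pvTriMid h1 t s)

-- analogous double loop counting close pairs
def pvCloseLoop : List Int → Int → Int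
  | [], c => c
  | h1 :: t, c => pvCloseLoop t (t.foldl (fun a h2 => if pvNearA h1 h2 then a + 1 else a) c)

def calculate_color_harmony_py (colors : List (List (String × List Int))) : Int :=
  if colors.length < 2 then 50
  else
    let hues := pvHues colors
    if hues.isEmpty then 50
    else
      let s1 := pvCompLoop hues 50
      let s2 := if 3 ≤ hues.length then pvTriLoop hues s1 else s1
      let close := pvCloseLoop hues 0
      let s3 := if 2 ≤ close then s2 + 10 else s2
      min 100 s3

-- ===== PORT B =====
-- one sweep: state (comp, tri, close); seen = hues[:j], hj :: rest = hues[j:]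
def pvScanB : List Int → List Int → Int × Int × Int → Int × Int × Int
  | _, [], st => st
  | seen, hj :: rest, (comp, tri, close) =>
      let left : Int := seen.countP (fun x => pvNearT x hj)
      let right : Int := rest.countP (fun x => pvNearT hj x)
      pvScanB (seen ++ [hj]) rest
        (comp + (rest.countP (fun x => pvNearC hj x) : Int),
         tri + left * right,
         close + (rest.countP (fun x => pvNearA hj x) : Int))

def calculate_color_harmony_py_alt (colors : List (List (String × List Int))) : Int :=
  if colors.length < 2 then 50
  else
    let hues := pvHues colors
    if hues.isEmpty then 50
    else
      let st := pvScanB [] hues (0, 0, 0)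
      min 100 (50 + 15 * st.1 + 20 * st.2.1 + (if 2 ≤ st.2.2 then 10 else 0))

-- ===== PRECONDITION & SPEC =====
def Spec_calculate_color_harmony_py (colors : List (List (String × List Int))) (out : Int) : Prop := out = calculate_color_harmony_py_alt colors
instance (colors : List (List (String × List Int))) (out : Int) : Decidable (Spec_calculate_color_harmony_py colors out) := by unfold Spec_calculate_color_harmony_py; infer_instance

-- ===== CLAIM (what is proved, stated in full; the proofs are below) =====
def Claim_equal_calculate_color_harmony_py : Prop := ∀ (colors : List (List (String × List Int))), Dom_calculate_color_harmony_py colors → Spec_calculate_color_harmony_py colors (calculate_color_harmony_py colors)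

-- ===== LEMMAS AND PROOFS =====

-- abstract counts: qualifying pairs, and A's triadic count decomposed
def pvPairs (p : Int → Int → Bool) : List Int → Int
  | [] => 0
  | h :: t => (t.countP (p h) : Int) + pvPairs p t

def pvM (x : Int) : List Int → Int
  | [] => 0
  | h2 :: t => (if pvNearT x h2 then (t.countP (pvNearT h2) : Int) else 0) + pvM x t

def pvT : List Int → Int
  | [] => 0
  | h1 :: t => pvM h1 t + pvT t

lemma pv_foldl_if_add (p : Int → Bool) (c : Int) (l : List Int) : ∀ s : Int,
    l.foldl (fun a x => if p x then a + c else a) s = s + c * (l.countP p : Int) := by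
  induction l with
  | nil => intro s; simp
  | cons h t ih =>
    intro s
    cases hp : p h <;> simp [hp, List.countP_cons, ih] <;> push_cast <;> ring

lemma pvCompLoop_eq (l : List Int) : ∀ s, pvCompLoop l s = s + 15 * pvPairs pvNearC l := by
  induction l with
  | nil => intro s; simp [pvCompLoop, pvPairs]
  | cons h t ih => intro s; rw [pvCompLoop, pv_foldl_if_add, ih]; simp [pvPairs]; ring

lemma pvCloseLoop_eq (l : List Int) : ∀ c, pvCloseLoop l c = c + pvPairs pvNearA l := by
  induction l with
  | nil => intro c; simp [pvCloseLoop, pvPairs]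
  | cons h t ih => intro c; rw [pvCloseLoop, pv_foldl_if_add, ih]; simp [pvPairs]; ring

lemma pvTriMid_eq (h1 : Int) (l : List Int) : ∀ s, pvTriMid h1 l s = s + 20 * pvM h1 l := by
  induction l with
  | nil => intro s; simp [pvTriMid, pvM]
  | cons h2 t ih =>
    intro s
    rw [pvTriMid, pv_foldl_if_add, ih]
    cases hb : pvNearT h1 h2 <;> simp [pvM, hb] <;> ring

lemma pvTriLoop_eq (l : List Int) : ∀ s, pvTriLoop l s = s + 20 * pvT l := by
  induction l with
  | nil => intro s; simp [pvTriLoop, pvT]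
  | cons h t ih => intro s; rw [pvTriLoop, pvTriMid_eq, ih]; simp [pvT]; ring

lemma pv_sum_map_ite (p : Int → Bool) (r : Int) (l : List Int) :
    (l.map (fun x => if p x then r else 0)).sum = r * (l.countP p : Int) := by
  induction l with
  | nil => simp
  | cons h t ih => cases hb : p h <;> simp [hb, ih, List.countP_cons] <;> push_cast <;> ring

lemma pvScanB_eq (l : List Int) : ∀ (seen : List Int) (comp tri close : Int),
    pvScanB seen l (comp, tri, close) =
      (comp + pvPairs pvNearC l,
       tri + pvT l + (seen.map (fun x => pvM x l)).sum,
       close + pvPairs pvNearA l) := by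
  induction l with
  | nil => intros; simp [pvScanB, pvPairs, pvT, pvM]
  | cons hj rest ih =>
    intro seen comp tri close
    rw [pvScanB, ih]
    refine Prod.ext ?_ (Prod.ext ?_ ?_) <;> simp [pvPairs, pvT, pvM, pv_sum_map_ite] <;> ring

lemma pvT_small (l : List Int) (hl : l.length < 3) : pvT l = 0 := by
  match l with
  | [] => simp [pvT]
  | [a] => simp [pvT, pvM]
  | [a, b] => simp [pvT, pvM]
  | a :: b :: c :: t => simp at hl; omega

-- ===== VERDICT (by name: the statement is the Claim_ definition above) =====
theorem calculate_color_harmony_py_spec : Claim_equal_calculate_color_harmony_py := by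
  intro colors _
  unfold Spec_calculate_color_harmony_py calculate_color_harmony_py calculate_color_harmony_py_alt
  by_cases h2 : colors.length < 2
  · simp [h2]
  · simp only [h2, if_false]
    by_cases he : (pvHues colors).isEmpty
    · simp [he]
    · rw [if_neg he, if_neg he]
      rw [pvScanB_eq, pvCompLoop_eq, pvCloseLoop_eq]
      simp only [List.map_nil, List.sum_nil, add_zero, zero_add]
      by_cases h3 : 3 ≤ (pvHues colors).length
      · rw [if_pos h3, pvTriLoop_eq]
        split_ifs <;> omega
      · have hT : pvT (pvHues colors) = 0 := pvT_small _ (by omega)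
        rw [if_neg h3]
        split_ifs <;> omega
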